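-- pv_equiv track=rewrite | github.com/gusn0905/Problems | SWEA/D3/정곤이의 단조 증가하는 수.py | monoInc
-- ===== SOURCE A (Python) =====
-- def monoInc(num):
--     cnt = 0
--     nums = str(num)
--     if len(nums) == 1:
--         return True
--     for c in range(len(nums)-1):
--         if nums[c] <= nums[c+1]:
--             cnt += 1
--     if cnt == (len(nums) -1):
--         return True
--     else:
--         return False
-- ===== SOURCE B (Python) =====
-- def monoInc(num):
--     s = str(num)
--     return s == ''.join(sorted(s))
-- ===== Notes on version B (the rewrite author's own statement) =====
-- stated objective: idiomatic
-- what changed: Replaces the indexed adjacent-pair counting loop (with its length-1 special case) by a sort-then-compare one-liner: the digit string equals its sorted version iff it is non-decreasing.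
import Mathlib
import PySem

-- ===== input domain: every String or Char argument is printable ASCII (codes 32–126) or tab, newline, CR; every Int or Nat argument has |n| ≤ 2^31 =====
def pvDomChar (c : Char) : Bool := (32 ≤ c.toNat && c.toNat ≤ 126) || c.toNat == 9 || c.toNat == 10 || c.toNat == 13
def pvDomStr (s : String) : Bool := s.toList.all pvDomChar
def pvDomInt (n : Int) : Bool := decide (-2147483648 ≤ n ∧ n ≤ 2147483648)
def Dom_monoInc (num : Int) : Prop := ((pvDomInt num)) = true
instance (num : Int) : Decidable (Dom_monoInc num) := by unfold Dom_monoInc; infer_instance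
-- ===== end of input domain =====

-- B replaces A's indexed pair-counting loop by 'str(num) equals its sorted self' (idiomatic, not faster).

-- ===== PORT A =====
def monoInc (num : Int) : Bool :=
  let nums := PySem.Int.toChars num
  if PySem.List.len nums == 1 then true
  else
    let cnt : Int := (PySem.List.pyRange 0 (PySem.List.len nums - 1) 1).foldl
      (fun cnt c =>
        if PySem.List.pyGetD nums c ' ' ≤ PySem.List.pyGetD nums (c + 1) ' ' then cnt + 1
        else cnt) 0
    if cnt == PySem.List.len nums - 1 then true else false

-- ===== PORT B =====
def monoInc_alt (num : Int) : Bool :=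
  let s := PySem.Int.toChars num
  s == PySem.List.sorted s (fun x => x) false

-- ===== PRECONDITION & SPEC =====
def Spec_monoInc (num : Int) (out : Bool) : Prop := out = monoInc_alt num
instance (num : Int) (out : Bool) : Decidable (Spec_monoInc num out) := by unfold Spec_monoInc; infer_instance

-- ===== CLAIM (what is proved, stated in full; the proofs are below) =====
def Claim_equal_monoInc : Prop := ∀ (num : Int), Dom_monoInc num → Spec_monoInc num (monoInc num)

-- ===== LEMMAS AND PROOFS =====

-- str(n) is never the empty string
theorem pv_toDigitsCore_ne_nil (b : Nat) : ∀ (f n : Nat) (l : List Char), l ≠ [] →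
    Nat.toDigitsCore b f n l ≠ [] := by
  intro f
  induction f with
  | zero => intro n l h; simpa [Nat.toDigitsCore] using h
  | succ f ih =>
    intro n l h
    simp only [Nat.toDigitsCore]
    split
    · simp
    · exact ih _ _ (by simp)

theorem pv_toDigits_ne_nil (b n : Nat) : Nat.toDigits b n ≠ [] := by
  simp only [Nat.toDigits, Nat.toDigitsCore]
  split
  · simp
  · exact pv_toDigitsCore_ne_nil b _ _ _ (by simp)

theorem pv_toChars_ne_nil (n : Int) : PySem.Int.toChars n ≠ [] := by
  unfold PySem.Int.toChars
  split
  · simp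
  · exact pv_toDigits_ne_nil 10 _

-- counting fold = countP
theorem pv_foldl_if_count (q : Int → Prop) [DecidablePred q] (xs : List Int) (i : Int) :
    xs.foldl (fun a x => if q x then a + 1 else a) i = i + (xs.countP (fun x => decide (q x)) : Int) := by
  induction xs generalizing i with
  | nil => simp
  | cons x t ih =>
    simp only [List.foldl_cons, List.countP_cons, ih, decide_eq_true_eq]
    split_ifs with h <;> push_cast <;> omega

-- adjacent condition over the index range ↔ IsChain
theorem pv_range_iff_chain (l : List Char) :
    (∀ c ∈ PySem.List.pyRange 0 ((l.length : Int) - 1) 1,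
        PySem.List.pyGetD l c ' ' ≤ PySem.List.pyGetD l (c + 1) ' ')
    ↔ l.IsChain (· ≤ ·) := by
  rw [List.isChain_iff_getElem]
  constructor
  · intro h i hi
    have hm : ((i : Int)) ∈ PySem.List.pyRange 0 ((l.length : Int) - 1) 1 := by
      rw [PySem.List.mem_pyRange_one]; omega
    have := h _ hm
    have e1 := PySem.List.pyGetD_eq_getElem (xs := l) (i := (i : Int)) (d := ' ')
      (by omega) (by exact_mod_cast (by omega : (i : Int) < l.length))
    have e2 := PySem.List.pyGetD_eq_getElem (xs := l) (i := (i : Int) + 1) (d := ' ')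
      (by omega) (by exact_mod_cast (by omega : (i : Int) + 1 < l.length))
    rw [e1, e2] at this
    simpa using this
  · intro h c hc
    rw [PySem.List.mem_pyRange_one] at hc
    have e1 := PySem.List.pyGetD_eq_getElem (xs := l) (i := c) (d := ' ')
      (by omega) (by exact_mod_cast (by omega : c < ((l.length : Int))))
    have e2 := PySem.List.pyGetD_eq_getElem (xs := l) (i := c + 1) (d := ' ')
      (by omega) (by exact_mod_cast (by omega : c + 1 < ((l.length : Int))))
    rw [e1, e2]
    have hidx : c.toNat + 1 < l.length := by omega
    have := h c.toNat hidx
    have hcc : (c + 1).toNat = c.toNat + 1 := by omega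
    simpa [hcc] using this

-- Pairwise ↔ sorted-equals-self
theorem pv_pairwise_iff_sorted (l : List Char) :
    l.Pairwise (· ≤ ·) ↔ PySem.List.sorted l (fun x => x) false = l := by
  constructor
  · intro h; exact PySem.List.sorted_eq_self_of_pairwise l (fun x => x) h
  · intro h
    have hp := PySem.List.sorted_pairwise (xs := l) (key := fun x => x)
    rw [h] at hp
    simpa using hp

-- ===== VERDICT (by name: the statement is the Claim_ definition above) =====
theorem monoInc_spec : Claim_equal_monoInc := by
  intro num _
  unfold Spec_monoInc monoInc monoInc_alt
  simp only [PySem.List.len_eq]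
  have hne0 : PySem.Int.toChars num ≠ [] := pv_toChars_ne_nil num
  generalize hg : PySem.Int.toChars num = l
  rw [hg] at hne0
  have hlen : 1 ≤ l.length := List.length_pos_of_ne_nil hne0
  by_cases h1 : l.length = 1
  · -- length-1: A returns true; a singleton equals its sort
    obtain ⟨c, hc⟩ := List.length_eq_one_iff.mp h1
    rw [hc]
    have hs : PySem.List.sorted [c] (fun x => x) false = [c] :=
      PySem.List.sorted_eq_self_of_pairwise [c] (fun x => x) (by simp)
    simp [hs]
  · have h2 : 2 ≤ l.length := by omega
    have hA : ((l.length : Int) == 1) = false := by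
      simp only [beq_eq_false_iff_ne, ne_eq]
      omega
    rw [hA]
    simp only [Bool.false_eq_true, if_false]
    simp only [pv_foldl_if_count
      (fun c => PySem.List.pyGetD l c ' ' ≤ PySem.List.pyGetD l (c + 1) ' ')]
    have hcnt :
        ((0 : Int) + ((PySem.List.pyRange 0 ((l.length : Int) - 1) 1).countP
            (fun c => decide (PySem.List.pyGetD l c ' ' ≤ PySem.List.pyGetD l (c + 1) ' ')) : Int)
          == (l.length : Int) - 1)
        = (l == PySem.List.sorted l (fun x => x) false) := by
      have hlenR : (PySem.List.pyRange 0 ((l.length : Int) - 1) 1).length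
          = ((l.length : Int) - 1).toNat := by
        simpa using PySem.List.length_pyRange_one 0 ((l.length : Int) - 1)
      by_cases hall : ∀ c ∈ PySem.List.pyRange 0 ((l.length : Int) - 1) 1,
          PySem.List.pyGetD l c ' ' ≤ PySem.List.pyGetD l (c + 1) ' '
      · have hcountP := List.countP_eq_length.mpr (fun a ha => decide_eq_true (hall a ha))
        have hsorted : PySem.List.sorted l (fun x => x) false = l :=
          (pv_pairwise_iff_sorted l).mp
            (List.isChain_iff_pairwise.mp ((pv_range_iff_chain l).mp hall))
        rw [hcountP, hlenR, hsorted]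
        simp
        omega
      · have hneq : (PySem.List.pyRange 0 ((l.length : Int) - 1) 1).countP
            (fun c => decide (PySem.List.pyGetD l c ' ' ≤ PySem.List.pyGetD l (c + 1) ' '))
            ≠ (PySem.List.pyRange 0 ((l.length : Int) - 1) 1).length := by
          intro h
          exact hall (fun a ha => of_decide_eq_true (List.countP_eq_length.mp h a ha))
        have hle := List.countP_le_length
          (l := PySem.List.pyRange 0 ((l.length : Int) - 1) 1)
          (p := fun c => decide (PySem.List.pyGetD l c ' ' ≤ PySem.List.pyGetD l (c + 1) ' '))
        have hnsorted : ¬ PySem.List.sorted l (fun x => x) false = l := by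
          intro hs
          exact hall ((pv_range_iff_chain l).mpr
            (List.isChain_iff_pairwise.mpr ((pv_pairwise_iff_sorted l).mpr hs)))
        rw [hlenR] at hneq hle
        have hB : (l == PySem.List.sorted l (fun x => x) false) = false := by
          simp only [beq_eq_false_iff_ne, ne_eq]
          intro h; exact hnsorted h.symm
        rw [hB]
        simp only [beq_eq_false_iff_ne, ne_eq]
        omega
    simp only [hcnt]
    cases hb : (l == PySem.List.sorted l (fun x => x) false) <;> simp
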